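-- pv_equiv track=rewrite | github.com/24127135/Futoshiki-Project | src/futoshiki/solvers/forward_chaining.py | _filter_pair
-- ===== SOURCE A (Python) =====
-- from typing import List
--
-- def _filter_pair(left: List[int], right: List[int], sign: int) -> tuple[List[int], List[int]]:
--     if sign == 1:
--         new_left = [a for a in left if any(a < b for b in right)]
--         new_right = [b for b in right if any(a < b for a in left)]
--     else:
--         new_left = [a for a in left if any(a > b for b in right)]
--         new_right = [b for b in right if any(a > b for a in left)]
--     return new_left, new_right
-- ===== SOURCE B (Python) =====
-- from typing import List
--
-- def _filter_pair(left: List[int], right: List[int], sign: int) -> tuple[List[int], List[int]]: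
--     if sign == 1:
--         if right:
--             m = max(right)
--             new_left = [a for a in left if a < m]
--         else:
--             new_left = []
--         if left:
--             m = min(left)
--             new_right = [b for b in right if m < b]
--         else:
--             new_right = []
--     else:
--         if right:
--             m = min(right)
--             new_left = [a for a in left if a > m]
--         else:
--             new_left = []
--         if left:
--             m = max(left)
--             new_right = [b for b in right if m > b]
--         else:
--             new_right = []
--     return new_left, new_right
-- ===== Notes on version B (the rewrite author's own statement) =====
-- stated objective: faster
-- what changed: B precomputes the max/min of the opposite list once and filters each list by a single scalar comparison, replacing A's inner any-scan over the other list.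
import Mathlib
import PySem

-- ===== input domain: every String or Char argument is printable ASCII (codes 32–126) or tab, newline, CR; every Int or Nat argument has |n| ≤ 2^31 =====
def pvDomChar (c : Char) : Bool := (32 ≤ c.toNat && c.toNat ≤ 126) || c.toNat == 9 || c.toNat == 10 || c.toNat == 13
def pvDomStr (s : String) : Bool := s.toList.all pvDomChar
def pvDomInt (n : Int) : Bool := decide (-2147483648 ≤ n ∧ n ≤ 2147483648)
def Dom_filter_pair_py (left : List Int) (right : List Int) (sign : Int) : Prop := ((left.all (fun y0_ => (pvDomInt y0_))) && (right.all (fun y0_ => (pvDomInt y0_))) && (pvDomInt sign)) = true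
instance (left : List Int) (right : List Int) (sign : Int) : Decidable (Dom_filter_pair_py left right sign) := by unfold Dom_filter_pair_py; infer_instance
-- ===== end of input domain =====

-- B replaces A's O(n*m) inner any-scan by one precomputed max/min of the opposite list (faster, asymptotic).

-- ===== PORT A =====
def filter_pair_py (left : List Int) (right : List Int) (sign : Int) : List Int × List Int :=
  if sign = 1 then
    (left.filter (fun a => right.any (fun b => decide (a < b))),
     right.filter (fun b => left.any (fun a => decide (a < b))))
  else
    (left.filter (fun a => right.any (fun b => decide (a > b))),
     right.filter (fun b => left.any (fun a => decide (a > b))))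

-- ===== PORT B =====
def filter_pair_py_alt (left : List Int) (right : List Int) (sign : Int) : List Int × List Int :=
  if sign = 1 then
    ((match PySem.List.max? right (fun x => x) with
      | none => []
      | some m => left.filter (fun a => decide (a < m))),
     (match PySem.List.min? left (fun x => x) with
      | none => []
      | some m => right.filter (fun b => decide (m < b))))
  else
    ((match PySem.List.min? right (fun x => x) with
      | none => []
      | some m => left.filter (fun a => decide (a > m))),
     (match PySem.List.max? left (fun x => x) with
      | none => []
      | some m => right.filter (fun b => decide (m > b))))

-- ===== PRECONDITION & SPEC =====
def Spec_filter_pair_py (left : List Int) (right : List Int) (sign : Int) (out : List Int × List Int) : Prop := out = filter_pair_py_alt left right sign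
instance (left : List Int) (right : List Int) (sign : Int) (out : List Int × List Int) : Decidable (Spec_filter_pair_py left right sign out) := by unfold Spec_filter_pair_py; infer_instance

-- ===== CLAIM (what is proved, stated in full; the proofs are below) =====
def Claim_equal_filter_pair_py : Prop := ∀ (left : List Int) (right : List Int) (sign : Int), Dom_filter_pair_py left right sign → Spec_filter_pair_py left right sign (filter_pair_py left right sign)

-- ===== LEMMAS AND PROOFS =====

lemma any_lt_max (xs : List Int) (a : Int) :
    xs.any (fun b => decide (a < b)) =
      (match PySem.List.max? xs (fun x => x) with
       | none => false
       | some m => decide (a < m)) := by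
  cases h : PySem.List.max? xs (fun x => x) with
  | none =>
      have : xs = [] := (PySem.List.max?_eq_none_iff xs (fun x => x)).mp h
      simp [this]
  | some m =>
      have hm : m ∈ xs := PySem.List.max?_mem h
      have hmax : ∀ y ∈ xs, y ≤ m := fun y hy => PySem.List.max?_isMax h y hy
      by_cases hc : a < m
      · simp only [hc, decide_true]
        exact List.any_eq_true.mpr ⟨m, hm, by simpa using hc⟩
      · simp only [hc, decide_false]
        refine List.any_eq_false.mpr (fun b hb => ?_)
        simp only [decide_eq_true_eq]
        exact fun hab => hc (lt_of_lt_of_le hab (hmax b hb))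

lemma any_gt_min (xs : List Int) (a : Int) :
    xs.any (fun b => decide (b < a)) =
      (match PySem.List.min? xs (fun x => x) with
       | none => false
       | some m => decide (m < a)) := by
  cases h : PySem.List.min? xs (fun x => x) with
  | none =>
      have : xs = [] := (PySem.List.min?_eq_none_iff xs (fun x => x)).mp h
      simp [this]
  | some m =>
      have hm : m ∈ xs := PySem.List.min?_mem h
      have hmin : ∀ y ∈ xs, m ≤ y := fun y hy => PySem.List.min?_isMin h y hy
      by_cases hc : m < a
      · simp only [hc, decide_true]
        exact List.any_eq_true.mpr ⟨m, hm, by simpa using hc⟩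
      · simp only [hc, decide_false]
        refine List.any_eq_false.mpr (fun b hb => ?_)
        simp only [decide_eq_true_eq]
        exact fun hab => hc (lt_of_le_of_lt (hmin b hb) hab)

-- ===== VERDICT (by name: the statement is the Claim_ definition above) =====
theorem filter_pair_py_spec : Claim_equal_filter_pair_py := by
  intro left right sign _
  unfold Spec_filter_pair_py filter_pair_py filter_pair_py_alt
  by_cases hs : sign = 1 <;> simp only [hs, if_true, reduceIte] <;>
    refine Prod.ext ?_ ?_
  · rw [show (left.filter (fun a => right.any (fun b => decide (a < b)))) =
         left.filter (fun a => (match PySem.List.max? right (fun x => x) with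
           | none => false | some m => decide (a < m))) from by
         exact List.filter_congr (fun a _ => any_lt_max right a)]
    cases PySem.List.max? right (fun x => x) <;> simp
  · rw [show (right.filter (fun b => left.any (fun a => decide (a < b)))) =
         right.filter (fun b => (match PySem.List.min? left (fun x => x) with
           | none => false | some m => decide (m < b))) from by
         exact List.filter_congr (fun b _ => any_gt_min left b)]
    cases PySem.List.min? left (fun x => x) <;> simp
  · rw [show (left.filter (fun a => right.any (fun b => decide (a > b)))) =
         left.filter (fun a => (match PySem.List.min? right (fun x => x) with
           | none => false | some m => decide (m < a))) from by
         exact List.filter_congr (fun a _ => any_gt_min right a)]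
    cases PySem.List.min? right (fun x => x) <;> simp [gt_iff_lt]
  · rw [show (right.filter (fun b => left.any (fun a => decide (a > b)))) =
         right.filter (fun b => (match PySem.List.max? left (fun x => x) with
           | none => false | some m => decide (b < m))) from by
         exact List.filter_congr (fun b _ => any_lt_max left b)]
    cases PySem.List.max? left (fun x => x) <;> simp [gt_iff_lt]
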